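-- pv_equiv track=rewrite | github.com/yizhen47/OperitCoder | tools/add_experiments_i18n.py | insert_after
-- ===== SOURCE A (Python) =====
-- def insert_after(d: dict, key: str, value, anchor: str) -> dict:
--     if key in d:
--         return d
--     new_data = {}
--     inserted = False
--     for k, v in d.items():
--         new_data[k] = v
--         if k == anchor:
--             new_data[key] = value
--             inserted = True
--     if not inserted:
--         new_data[key] = value
--     return new_data
-- ===== SOURCE B (Python) =====
-- def insert_after(d: dict, key: str, value, anchor: str) -> dict:
--     if key in d:
--         return d
--     keys = list(d)
--     items = list(d.items())
--     if anchor in keys: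
--         items.insert(keys.index(anchor) + 1, (key, value))
--     else:
--         items.append((key, value))
--     return dict(items)
-- ===== Notes on version B (the rewrite author's own statement) =====
-- stated objective: alternative
-- what changed: A streams through the dict copying every pair into a fresh dict with an 'inserted' flag; B instead locates the anchor's position with .index and splices the new pair into the materialized item list (or appends when the anchor is absent), rebuilding the dict once.
import Mathlib
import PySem

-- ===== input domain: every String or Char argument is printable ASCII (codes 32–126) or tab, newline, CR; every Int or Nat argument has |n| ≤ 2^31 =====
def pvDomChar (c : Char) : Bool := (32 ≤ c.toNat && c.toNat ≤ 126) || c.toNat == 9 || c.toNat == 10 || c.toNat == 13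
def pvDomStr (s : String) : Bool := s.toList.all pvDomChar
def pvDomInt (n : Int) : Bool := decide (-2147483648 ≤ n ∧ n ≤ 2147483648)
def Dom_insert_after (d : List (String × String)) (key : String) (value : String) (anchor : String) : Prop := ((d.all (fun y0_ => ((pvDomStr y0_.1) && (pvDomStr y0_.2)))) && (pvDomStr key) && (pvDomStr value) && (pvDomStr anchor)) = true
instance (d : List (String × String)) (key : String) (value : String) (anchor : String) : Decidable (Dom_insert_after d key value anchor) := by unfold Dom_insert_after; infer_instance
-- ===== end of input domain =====

-- ===== PORT A =====
-- B replaces A's copy-everything-with-a-flag loop by find-the-anchor-position-then-splice; same cost, different decomposition.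
def insert_after (d : List (String × String)) (key : String) (value : String) (anchor : String) : List (String × String) :=
  if (d.map Prod.fst).contains key then d
  else
    let st := d.foldl
      (fun (st : PySem.Dict String String × Bool) kv =>
        let nd := st.1.insert kv.1 kv.2
        if kv.1 == anchor then (nd.insert key value, true) else (nd, st.2))
      (PySem.Dict.empty, false)
    let nd := if st.2 then st.1 else st.1.insert key value
    nd.items

-- ===== PORT B =====
def insert_after_alt (d : List (String × String)) (key : String) (value : String) (anchor : String) : List (String × String) :=
  if (d.map Prod.fst).contains key then d
  else
    let keys := d.map Prod.fst
    let items :=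
      match PySem.List.index? keys anchor with
      | some i => PySem.List.insert d ((i : Int) + 1) (key, value)
      | none   => d ++ [(key, value)]
    (PySem.Dict.ofList items).items

-- ===== PRECONDITION & SPEC =====
-- Pre_ requires distinct keys: the Python argument is a dict, and an association list with
-- duplicate keys does not represent any dict A can receive (building the dict collapses them).
def Pre_insert_after (d : List (String × String)) (key : String) (value : String) (anchor : String) : Prop :=
  (d.map Prod.fst).Nodup
instance (d : List (String × String)) (key : String) (value : String) (anchor : String) : Decidable (Pre_insert_after d key value anchor) := by unfold Pre_insert_after; infer_instance
def pvWitness_insert_after : (List (String × String)) × String × String × String :=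
  ([("a", "1"), ("b", "2")], "k", "v", "a")
def Spec_insert_after (d : List (String × String)) (key : String) (value : String) (anchor : String) (out : List (String × String)) : Prop := out = insert_after_alt d key value anchor
instance (d : List (String × String)) (key : String) (value : String) (anchor : String) (out : List (String × String)) : Decidable (Spec_insert_after d key value anchor out) := by unfold Spec_insert_after; infer_instance

-- ===== CLAIM (what is proved, stated in full; the proofs are below) =====
def Claim_equal_insert_after : Prop := ∀ (d : List (String × String)) (key : String) (value : String) (anchor : String), Dom_insert_after d key value anchor → Pre_insert_after d key value anchor → Spec_insert_after d key value anchor (insert_after d key value anchor)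

-- ===== LEMMAS AND PROOFS =====

-- A's loop body, abbreviated for the lemmas.
def pvStep (key value anchor : String) (st : PySem.Dict String String × Bool) (kv : String × String) : PySem.Dict String String × Bool :=
  let nd := st.1.insert kv.1 kv.2
  if kv.1 == anchor then (nd.insert key value, true) else (nd, st.2)

lemma mk_items (nd : PySem.Dict String String) : PySem.Dict.mk nd.items = nd := rfl

lemma loop_noanchor (key value anchor : String) :
    ∀ (l : List (String × String)) (nd : PySem.Dict String String) (b : Bool),
      (∀ p ∈ l, nd.contains p.1 = false) → (l.map Prod.fst).Nodup → anchor ∉ l.map Prod.fst →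
      l.foldl (pvStep key value anchor) (nd, b) = (PySem.Dict.mk (nd.items ++ l), b) := by
  intro l
  induction l with
  | nil => intro nd b _ _ _; simp [mk_items]
  | cons kv rest ih =>
    intro nd b hfresh hnodup hanch
    rw [List.map_cons, List.nodup_cons] at hnodup
    have hk : kv.1 ≠ anchor := by
      intro h; exact hanch (by simp [← h])
    have hstep : pvStep key value anchor (nd, b) kv = (nd.insert kv.1 kv.2, b) := by
      simp [pvStep, hk]
    have hfresh' : ∀ p ∈ rest, (nd.insert kv.1 kv.2).contains p.1 = false := by
      intro p hp
      rw [PySem.Dict.contains_insert]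
      have h1 : p.1 ≠ kv.1 := by
        intro h; exact hnodup.1 (h ▸ List.mem_map_of_mem hp)
      simp [h1, hfresh p (by simp [hp])]
    calc ((kv :: rest).foldl (pvStep key value anchor) (nd, b))
        = rest.foldl (pvStep key value anchor) (nd.insert kv.1 kv.2, b) := by
          simp [List.foldl_cons, hstep]
      _ = (PySem.Dict.mk ((nd.insert kv.1 kv.2).items ++ rest), b) := by
          exact ih _ _ hfresh' hnodup.2 (by intro h; exact hanch (by simp [h]))
      _ = (PySem.Dict.mk (nd.items ++ kv :: rest), b) := by
          rw [PySem.Dict.items_insert_of_not_contains _ _ (hfresh kv (by simp))]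
          simp

lemma loop_main (key value anchor : String) :
    ∀ (l : List (String × String)) (nd : PySem.Dict String String),
      (∀ p ∈ l, nd.contains p.1 = false) → (l.map Prod.fst).Nodup →
      nd.contains key = false → key ∉ l.map Prod.fst →
      l.foldl (pvStep key value anchor) (nd, false) =
        (match PySem.List.index? (l.map Prod.fst) anchor with
         | some i => (PySem.Dict.mk (nd.items ++ PySem.List.insert l ((i : Int) + 1) (key, value)), true)
         | none   => (PySem.Dict.mk (nd.items ++ l), false)) := by
  intro l
  induction l with
  | nil => intro nd _ _ _ _; simp [mk_items, PySem.List.index?]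
  | cons kv rest ih =>
    intro nd hfresh hnodup hkey hkeyl
    have hkeyr : key ∉ rest.map Prod.fst := fun h => hkeyl (by simp [h])
    have hkeyk : key ≠ kv.1 := fun h => hkeyl (by simp [h])
    have hkvrest : kv.1 ∉ rest.map Prod.fst := by
      have h0 := hnodup; rw [List.map_cons, List.nodup_cons] at h0; exact h0.1
    have hnodup' : (rest.map Prod.fst).Nodup := by
      have h0 := hnodup; rw [List.map_cons, List.nodup_cons] at h0; exact h0.2
    have hfreshr : ∀ p ∈ rest, (nd.insert kv.1 kv.2).contains p.1 = false := by
      intro p hp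
      rw [PySem.Dict.contains_insert]
      have h1 : p.1 ≠ kv.1 := by
        intro h; exact hkvrest (h ▸ (List.mem_map_of_mem hp))
      simp [h1, hfresh p (by simp [hp])]
    by_cases hk : kv.1 = anchor
    · -- anchor found at the head
      have hanchr : anchor ∉ rest.map Prod.fst := hk ▸ hkvrest
      have hstep : pvStep key value anchor (nd, false) kv
          = ((nd.insert kv.1 kv.2).insert key value, true) := by
        simp [pvStep, hk]
      have hc1 : (nd.insert kv.1 kv.2).contains key = false := by
        rw [PySem.Dict.contains_insert]; simp [hkeyk, hkey]
      have hfresh2 : ∀ p ∈ rest, ((nd.insert kv.1 kv.2).insert key value).contains p.1 = false := by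
        intro p hp
        rw [PySem.Dict.contains_insert]
        have h1 : p.1 ≠ key := by
          intro h; exact hkeyr (h ▸ (List.mem_map_of_mem hp))
        simp [h1, hfreshr p hp]
      rw [List.foldl_cons, hstep, loop_noanchor key value anchor rest _ true hfresh2 hnodup' hanchr]
      have hidx : PySem.List.index? ((kv :: rest).map Prod.fst) anchor = some 0 := by
        simp only [List.map_cons, hk]
        exact PySem.List.index?_cons_self _ _
      rw [hidx]
      have hins : PySem.List.insert (kv :: rest) ((0 : Nat) + 1 : Int) (key, value)
          = kv :: (key, value) :: rest := by
        have := PySem.List.insert_natCast (kv :: rest) 1 (key, value) (by simp)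
        simpa using this
      simp only [Nat.cast_zero] at hins ⊢
      rw [hins]
      rw [PySem.Dict.items_insert_of_not_contains _ _ hc1,
          PySem.Dict.items_insert_of_not_contains _ _ (hfresh kv (by simp))]
      simp
    · -- head is not the anchor
      have hstep : pvStep key value anchor (nd, false) kv = (nd.insert kv.1 kv.2, false) := by
        simp [pvStep, hk]
      rw [List.foldl_cons, hstep,
          ih _ hfreshr hnodup' (by rw [PySem.Dict.contains_insert]; simp [hkeyk, hkey]) hkeyr]
      have hidx : PySem.List.index? ((kv :: rest).map Prod.fst) anchor
          = (PySem.List.index? (rest.map Prod.fst) anchor).map (· + 1) := by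
        simp only [List.map_cons]
        exact PySem.List.index?_cons_of_ne _ hk
      rw [hidx]
      cases h : PySem.List.index? (rest.map Prod.fst) anchor with
      | none =>
        simp only [h, Option.map_none]
        rw [PySem.Dict.items_insert_of_not_contains _ _ (hfresh kv (by simp))]
        simp
      | some i =>
        simp only [h, Option.map_some]
        obtain ⟨hi, -, -⟩ := PySem.List.getElem_of_index?_eq_some h
        rw [List.length_map] at hi
        have hins1 : PySem.List.insert rest ((i : Nat) + 1 : Int) (key, value)
            = rest.take (i + 1) ++ (key, value) :: rest.drop (i + 1) := by
          have := PySem.List.insert_natCast rest (i + 1) (key, value) (by omega)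
          rw [← this]; norm_cast
        have hins2 : PySem.List.insert (kv :: rest) (((i + 1 : Nat) : Int) + 1) (key, value)
            = kv :: (rest.take (i + 1) ++ (key, value) :: rest.drop (i + 1)) := by
          have := PySem.List.insert_natCast (kv :: rest) (i + 2) (key, value) (by simp; omega)
          rw [show (((i + 1 : Nat) : Int) + 1) = ((i + 2 : Nat) : Int) by push_cast; ring, this]
          simp [List.take_succ_cons, List.drop_succ_cons]
        rw [hins2]
        have : ((i : Int) + 1) = (((i + 1 : Nat) : Int)) := by push_cast; ring
        rw [this] at *
        rw [show (((i + 1 : Nat) : Int)) = ((i : Nat) + 1 : Int) by push_cast; ring, hins1]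
        rw [PySem.Dict.items_insert_of_not_contains _ _ (hfresh kv (by simp))]
        simp

lemma items_ofList_of_nodup (L : List (String × String)) (h : (L.map Prod.fst).Nodup) :
    (PySem.Dict.ofList L).items = L := by
  have h2 : (PySem.Dict.ofList L) = L.foldl (fun d p => d.insert p.1 p.2) PySem.Dict.empty :=
    PySem.Dict.ext_iff.mpr rfl
  rw [h2]
  have := PySem.Dict.items_foldl_insert_fresh (l := L) (k := Prod.fst) (v := Prod.snd)
      (d := PySem.Dict.empty) (by intro a _; simp [PySem.Dict.contains_empty]) h
  simpa using this

-- ===== VERDICT (by name: the statement is the Claim_ definition above) =====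
theorem insert_after_spec : Claim_equal_insert_after := by
  intro d key value anchor _ hpre
  unfold Spec_insert_after insert_after insert_after_alt
  cases hc : (d.map Prod.fst).contains key with
  | true => simp
  | false =>
    have hmem : key ∉ d.map Prod.fst := by simpa using hc
    simp only [Bool.false_eq_true, if_false]
    have hfold := loop_main key value anchor d PySem.Dict.empty
      (by intro p _; simp [PySem.Dict.contains_empty]) hpre
      (by simp [PySem.Dict.contains_empty]) hmem
    have hfoldstep : d.foldl (fun (st : PySem.Dict String String × Bool) kv =>
        let nd := st.1.insert kv.1 kv.2
        if kv.1 == anchor then (nd.insert key value, true) else (nd, st.2))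
        (PySem.Dict.empty, false) = d.foldl (pvStep key value anchor) (PySem.Dict.empty, false) := rfl
    rw [hfoldstep, hfold]
    cases h : PySem.List.index? (d.map Prod.fst) anchor with
    | none =>
      simp only [Bool.false_eq_true, if_false]
      have hcmk : (PySem.Dict.mk ((PySem.Dict.empty : PySem.Dict String String).items ++ d)).contains key = false := by
        rw [PySem.Dict.contains_mk]
        simp only [PySem.Dict.empty, List.nil_append]
        rw [List.any_eq_false]
        intro p hp
        simp only [beq_iff_eq]
        intro hpk; exact hmem (hpk ▸ List.mem_map_of_mem hp)
      rw [PySem.Dict.items_insert_of_not_contains _ _ hcmk]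
      rw [items_ofList_of_nodup]
      · simp [PySem.Dict.empty]
      · simp only [List.map_append, List.map_cons, List.map_nil]
        rw [List.nodup_append]
        exact ⟨hpre, List.nodup_singleton _,
          fun a ha b hb heq => hmem ((heq.trans (List.mem_singleton.mp hb)) ▸ ha)⟩
    | some i =>
      rw [if_pos rfl]
      dsimp only
      obtain ⟨hi, -, -⟩ := PySem.List.getElem_of_index?_eq_some h
      rw [List.length_map] at hi
      have hins : PySem.List.insert d ((i : Int) + 1) (key, value)
          = d.take (i + 1) ++ (key, value) :: d.drop (i + 1) := by
        have := PySem.List.insert_natCast d (i + 1) (key, value) (by omega)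
        rw [← this]; norm_cast
      rw [items_ofList_of_nodup]
      · simp [PySem.Dict.empty]
      · rw [hins]
        simp only [List.map_append, List.map_cons, List.map_take, List.map_drop]
        have hperm : ((d.map Prod.fst).take (i + 1) ++ key :: (d.map Prod.fst).drop (i + 1)).Perm
            (key :: d.map Prod.fst) := by
          have h1 : ((d.map Prod.fst).take (i + 1) ++ key :: (d.map Prod.fst).drop (i + 1)).Perm
              (key :: ((d.map Prod.fst).take (i + 1) ++ (d.map Prod.fst).drop (i + 1))) :=
            List.perm_middle
          rwa [List.take_append_drop] at h1
        exact hperm.nodup_iff.mpr (List.nodup_cons.mpr ⟨hmem, hpre⟩)
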